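-- pv_equiv track=rewrite | github.com/WangShuo0317/UGUiNER | Eval.py | adjust_labels
-- ===== SOURCE A (Python) =====
-- def adjust_labels(word_indices,symbol_indices,token_offsets, labels):
--     """
--     调整标签列表，确保一个单词对应的所有 token 的标签一致。
--
--     参数:
--         word_indices (list): 单词的索引列表，例如 [(0, 3), (4, 10), ...]。
--         token_offsets (list): 分词后的 offsets 列表，例如 [(0, 3), (3, 8), ...]。
--         labels (list): 分词后的标签列表，例如 [0, 1, 0, ...]。
--
--     返回:
--         list: 调整后的标签列表。
--     """
--     adjusted_labels = labels.copy()  # 复制原始标签列表以避免修改原列表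
--     for word_start, word_end in word_indices:
--         # 找到当前单词对应的所有 token
--         token_indices = [
--             i for i, (token_start, token_end) in enumerate(token_offsets)
--             if token_start < word_end and token_end > word_start
--         ]
--         # 如果当前单词对应的 token 中有任何一个标签为 1，则将所有 token 的标签设置为 1
--         if any(labels[i] == 1 for i in token_indices):
--             for i in token_indices:
--                 adjusted_labels[i] = 1
--
--     for symbol_start, symbol_end in symbol_indices:
--         # 找到当前单词对应的所有 token
--         token_indices = [
--             i for i, (token_start, token_end) in enumerate(token_offsets)
--             if token_start == symbol_start and token_end == symbol_end
--         ]
--         # 如果当前单词对应的 token 中有任何一个标签为 1，则将所有 token 的标签设置为 1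
--         for i in token_indices:
--             adjusted_labels[i] = 0
--
--     return adjusted_labels
-- ===== SOURCE B (Python) =====
-- def adjust_labels(word_indices, symbol_indices, token_offsets, labels):
--     # "hot" words: words for which some overlapping token carries original label 1
--     hot = [w for w in word_indices
--            if any(ts < w[1] and te > w[0] and lab == 1
--                   for (ts, te), lab in zip(token_offsets, labels))]
--     symbol_set = set(symbol_indices)
--     out = list(labels)
--     for i, tok in enumerate(token_offsets):
--         if tok in symbol_set:
--             out[i] = 0
--         elif any(tok[0] < we and tok[1] > ws for ws, we in hot):
--             out[i] = 1
--     return out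
-- ===== Notes on version B (the rewrite author's own statement) =====
-- stated objective: alternative
-- what changed: B replaces A's two in-place mutation passes (per-word and per-symbol inner scans over all tokens) by precomputing the list of 'hot' words and a symbol set, then building the output in a single token-centric pass; the symbol pass drops from O(S*T) to O(S+T).
import Mathlib
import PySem

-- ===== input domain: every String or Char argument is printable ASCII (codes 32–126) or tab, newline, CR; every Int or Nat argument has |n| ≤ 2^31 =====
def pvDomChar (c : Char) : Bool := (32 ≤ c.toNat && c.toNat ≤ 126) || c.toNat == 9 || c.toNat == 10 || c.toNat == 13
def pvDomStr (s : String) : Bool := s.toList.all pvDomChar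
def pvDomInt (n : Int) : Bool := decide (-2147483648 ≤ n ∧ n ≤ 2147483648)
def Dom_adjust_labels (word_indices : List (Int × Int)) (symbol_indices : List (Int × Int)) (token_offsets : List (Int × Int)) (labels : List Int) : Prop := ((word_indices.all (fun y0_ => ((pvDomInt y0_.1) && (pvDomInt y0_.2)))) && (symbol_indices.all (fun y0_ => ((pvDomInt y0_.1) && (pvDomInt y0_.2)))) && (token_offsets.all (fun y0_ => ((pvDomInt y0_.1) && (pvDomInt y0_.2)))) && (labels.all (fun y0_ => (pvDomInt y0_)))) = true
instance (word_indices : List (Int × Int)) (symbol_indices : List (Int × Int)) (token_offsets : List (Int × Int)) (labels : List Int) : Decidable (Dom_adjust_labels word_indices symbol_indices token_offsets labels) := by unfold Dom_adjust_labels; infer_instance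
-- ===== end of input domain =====

-- B builds the output in one token-centric pass from a precomputed hot-word list and a symbol
-- set, instead of A's two in-place mutation passes with inner token scans (alternative).

-- ===== PORT A =====
-- token_indices of the word pass:  [i for i,(ts,te) in enumerate(token_offsets) if ts < we and te > ws]
def pvA_wordIdxs (token_offsets : List (Int × Int)) (w : Int × Int) : List Int :=
  (PySem.List.enumerate token_offsets).filterMap
    (fun p => if p.2.1 < w.2 && p.2.2 > w.1 then some p.1 else none)

-- token_indices of the symbol pass: exact offset match
def pvA_symIdxs (token_offsets : List (Int × Int)) (s : Int × Int) : List Int :=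
  (PySem.List.enumerate token_offsets).filterMap
    (fun p => if p.2.1 == s.1 && p.2.2 == s.2 then some p.1 else none)

-- body of A's word loop
def pvA_wordStep (token_offsets : List (Int × Int)) (labels : List Int)
    (adj : List Int) (w : Int × Int) : List Int :=
  let tis := pvA_wordIdxs token_offsets w
  if tis.any (fun i => PySem.List.pyGetD labels i 0 == 1) then
    tis.foldl (fun a i => PySem.List.pySetD a i 1) adj
  else adj

-- body of A's symbol loop
def pvA_symStep (token_offsets : List (Int × Int))
    (adj : List Int) (s : Int × Int) : List Int :=
  (pvA_symIdxs token_offsets s).foldl (fun a i => PySem.List.pySetD a i 0) adj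

def adjust_labels (word_indices : List (Int × Int)) (symbol_indices : List (Int × Int)) (token_offsets : List (Int × Int)) (labels : List Int) : List Int :=
  let adjusted := word_indices.foldl (pvA_wordStep token_offsets labels) labels
  symbol_indices.foldl (pvA_symStep token_offsets) adjusted

-- ===== PORT B =====
-- does word w have an overlapping token with original label 1?  (the 'hot' comprehension's test)
def pvB_isHot (token_offsets : List (Int × Int)) (labels : List Int) (w : Int × Int) : Bool :=
  (token_offsets.zip labels).any (fun p => p.1.1 < w.2 && p.1.2 > w.1 && p.2 == 1)

-- body of B's token loop
def pvB_step (hot : List (Int × Int)) (symbol_set : PySem.Set (Int × Int))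
    (out : List Int) (p : Int × (Int × Int)) : List Int :=
  if PySem.Set.contains symbol_set p.2 then PySem.List.pySetD out p.1 0
  else if hot.any (fun w => p.2.1 < w.2 && p.2.2 > w.1) then PySem.List.pySetD out p.1 1
  else out

def adjust_labels_alt (word_indices : List (Int × Int)) (symbol_indices : List (Int × Int)) (token_offsets : List (Int × Int)) (labels : List Int) : List Int :=
  let hot := word_indices.filter (pvB_isHot token_offsets labels)
  let symbol_set := PySem.Set.ofList symbol_indices
  (PySem.List.enumerate token_offsets).foldl (pvB_step hot symbol_set) labels

-- ===== PRECONDITION & SPEC =====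
-- Pre_ excludes exactly the inputs on which A raises IndexError: those where some token with
-- index >= len(labels) overlaps a word interval or exactly matches a symbol interval (there A
-- indexes labels or assigns adjusted_labels past the end).
def Pre_adjust_labels (word_indices : List (Int × Int)) (symbol_indices : List (Int × Int)) (token_offsets : List (Int × Int)) (labels : List Int) : Prop :=
  ∀ k, ∀ hk : k < token_offsets.length, labels.length ≤ k →
    (∀ w ∈ word_indices,
       ¬ (token_offsets[k].1 < w.2 ∧ token_offsets[k].2 > w.1)) ∧
    token_offsets[k] ∉ symbol_indices
instance (word_indices : List (Int × Int)) (symbol_indices : List (Int × Int)) (token_offsets : List (Int × Int)) (labels : List Int) : Decidable (Pre_adjust_labels word_indices symbol_indices token_offsets labels) := by unfold Pre_adjust_labels; infer_instance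

def pvWitness_adjust_labels : (List (Int × Int)) × (List (Int × Int)) × (List (Int × Int)) × List Int :=
  ([(0, 3)], [(3, 4)], [(0, 2), (2, 3), (3, 4)], [1, 0, 0])

def Spec_adjust_labels (word_indices : List (Int × Int)) (symbol_indices : List (Int × Int)) (token_offsets : List (Int × Int)) (labels : List Int) (out : List Int) : Prop := out = adjust_labels_alt word_indices symbol_indices token_offsets labels
instance (word_indices : List (Int × Int)) (symbol_indices : List (Int × Int)) (token_offsets : List (Int × Int)) (labels : List Int) (out : List Int) : Decidable (Spec_adjust_labels word_indices symbol_indices token_offsets labels out) := by unfold Spec_adjust_labels; infer_instance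

-- ===== CLAIM (what is proved, stated in full; the proofs are below) =====
def Claim_equal_adjust_labels : Prop := ∀ (word_indices : List (Int × Int)) (symbol_indices : List (Int × Int)) (token_offsets : List (Int × Int)) (labels : List Int), Dom_adjust_labels word_indices symbol_indices token_offsets labels → Pre_adjust_labels word_indices symbol_indices token_offsets labels → Spec_adjust_labels word_indices symbol_indices token_offsets labels (adjust_labels word_indices symbol_indices token_offsets labels)

-- ===== LEMMAS AND PROOFS =====

-- "does some element of wi pass q against the token (if any)?"
def pvTokAny (wi : List (Int × Int)) (q : (Int × Int) → (Int × Int) → Bool)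
    (o : Option (Int × Int)) : Bool :=
  match o with
  | some tok => wi.any (fun w => q tok w)
  | none => false

-- folding list assignments of a constant over a list of nonnegative indices, elementwise
theorem pv_foldl_pySetD_getElem? (c : Int) (tis : List Int) (a : List Int)
    (hnn : ∀ i ∈ tis, 0 ≤ i) (j : Nat) :
    (tis.foldl (fun x i => PySem.List.pySetD x i c) a)[j]? =
      if (j : Int) ∈ tis ∧ j < a.length then some c else a[j]? := by
  induction tis generalizing a with
  | nil => simp
  | cons i tis ih =>
    have hi : 0 ≤ i := hnn i (by simp)
    rw [List.foldl_cons, PySem.List.pySetD_of_nonneg a c hi,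
      ih _ (fun x hx => hnn x (List.mem_cons_of_mem _ hx))]
    simp only [List.length_set, List.getElem?_set, List.mem_cons]
    have hiff : ((j : Int) = i) ↔ (i.toNat = j) := by omega
    have hnone : ¬ j < a.length → a[j]? = none := by
      intro h; rw [List.getElem?_eq_none_iff]; omega
    by_cases hR : i.toNat = j <;> by_cases hP : (j : Int) ∈ tis <;>
      by_cases hQ : j < a.length <;>
        simp_all [hiff] <;> omega

theorem pv_foldl_pySetD_length (c : Int) (tis : List Int) (a : List Int) :
    (tis.foldl (fun x i => PySem.List.pySetD x i c) a).length = a.length := by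
  induction tis generalizing a with
  | nil => rfl
  | cons i tis ih => simp [List.foldl_cons, ih, PySem.List.length_pySetD]

-- membership in a `[i for i, tok in enumerate(xs) if q(tok)]` index list
theorem pv_mem_filterMap_enumerate (xs : List (Int × Int)) (q : (Int × Int) → Bool) (j : Nat) :
    ((j : Int) ∈ (PySem.List.enumerate xs).filterMap
        (fun p => if q p.2 then some p.1 else none)) ↔
      ∃ h : j < xs.length, q xs[j] = true := by
  constructor
  · rintro hm
    rw [List.mem_filterMap] at hm
    obtain ⟨p, hp, hf⟩ := hm
    rw [PySem.List.mem_enumerate_iff] at hp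
    obtain ⟨k, hk, rfl⟩ := hp
    simp only at hf
    by_cases hq : q xs[k]
    · simp only [hq, if_pos] at hf
      have hjk : j = k := by
        have := Option.some.inj hf
        omega
      subst hjk; exact ⟨hk, hq⟩
    · simp [hq] at hf
  · rintro ⟨h, hq⟩
    rw [List.mem_filterMap]
    refine ⟨((0 : Int) + (j : Int), xs[j]), ?_, by simp [hq]⟩
    rw [PySem.List.mem_enumerate_iff]
    exact ⟨j, h, rfl⟩

theorem pv_nonneg_filterMap_enumerate (xs : List (Int × Int)) (q : (Int × Int) → Bool) :
    ∀ i ∈ (PySem.List.enumerate xs).filterMap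
        (fun p => if q p.2 then some p.1 else none), 0 ≤ i := by
  intro i hm
  rw [List.mem_filterMap] at hm
  obtain ⟨p, hp, hf⟩ := hm
  rw [PySem.List.mem_enumerate_iff] at hp
  obtain ⟨k, hk, rfl⟩ := hp
  simp only at hf
  by_cases hq : q xs[k]
  · simp only [hq, if_pos] at hf
    have := Option.some.inj hf
    omega
  · simp [hq] at hf

theorem pv_nonneg_wordIdxs (toks : List (Int × Int)) (w : Int × Int) :
    ∀ i ∈ pvA_wordIdxs toks w, 0 ≤ i := by
  intro i h
  rw [pvA_wordIdxs] at h
  exact pv_nonneg_filterMap_enumerate toks (fun t => t.1 < w.2 && t.2 > w.1) i h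

theorem pv_nonneg_symIdxs (toks : List (Int × Int)) (s : Int × Int) :
    ∀ i ∈ pvA_symIdxs toks s, 0 ≤ i := by
  intro i h
  rw [pvA_symIdxs] at h
  exact pv_nonneg_filterMap_enumerate toks (fun t => t.1 == s.1 && t.2 == s.2) i h

-- A's "some token of this word has label 1" test equals B's zip-based test (given enough labels)
theorem pv_anyA_eq_isHot (token_offsets : List (Int × Int)) (labels : List Int)
    (w : Int × Int)
    (hw : ∀ k, ∀ hk : k < token_offsets.length, labels.length ≤ k →
      ¬ (token_offsets[k].1 < w.2 ∧ token_offsets[k].2 > w.1)) :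
    ((pvA_wordIdxs token_offsets w).any (fun i => PySem.List.pyGetD labels i 0 == 1)) =
      pvB_isHot token_offsets labels w := by
  unfold pvA_wordIdxs pvB_isHot
  rw [Bool.eq_iff_iff]
  simp only [List.any_eq_true]
  constructor
  · rintro ⟨i, hm, hv⟩
    rw [List.mem_filterMap] at hm
    obtain ⟨p, hp, hf⟩ := hm
    rw [PySem.List.mem_enumerate_iff] at hp
    obtain ⟨k, hk, rfl⟩ := hp
    simp only at hf
    by_cases hq : (token_offsets[k].1 < w.2 && token_offsets[k].2 > w.1) = true
    · simp only [hq, if_pos] at hf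
      obtain rfl : i = (0 : Int) + (k : Int) := (Option.some.inj hf).symm
      have hkL : k < labels.length := by
        by_contra hge
        exact hw k hk (by omega) (by simpa using hq)
      refine ⟨(token_offsets[k], labels[k]), ?_, ?_⟩
      · rw [List.mem_iff_getElem]
        refine ⟨k, by simp [List.length_zip]; omega, by simp [List.getElem_zip]⟩
      · have hg : PySem.List.pyGetD labels ((0:Int) + (k:Int)) 0 = labels[k] := by
          rw [zero_add, PySem.List.pyGetD_natCast, List.getD_eq_getElem labels 0 hkL]
        rw [hg] at hv
        simp_all
    · simp [hq] at hf
  · rintro ⟨p, hp, hv⟩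
    rw [List.mem_iff_getElem] at hp
    obtain ⟨k, hk, rfl⟩ := hp
    have hk' : k < token_offsets.length ∧ k < labels.length := by
      simp [List.length_zip] at hk; omega
    refine ⟨(0 : Int) + (k : Int), ?_, ?_⟩
    · rw [List.mem_filterMap]
      refine ⟨((0:Int) + (k:Int), token_offsets[k]), ?_, ?_⟩
      · rw [PySem.List.mem_enumerate_iff]; exact ⟨k, hk'.1, rfl⟩
      · simp only [List.getElem_zip] at hv
        simp_all
    · simp only [List.getElem_zip] at hv
      have hg : PySem.List.pyGetD labels ((0:Int) + (k:Int)) 0 = labels[k] := by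
        rw [zero_add, PySem.List.pyGetD_natCast, List.getD_eq_getElem labels 0 hk'.2]
      simp_all

-- elementwise characterisation of A's word pass
theorem pv_wordfold_char (token_offsets : List (Int × Int)) (labels : List Int)
    (wi : List (Int × Int))
    (hws : ∀ w ∈ wi, ∀ k, ∀ hk : k < token_offsets.length, labels.length ≤ k →
      ¬ (token_offsets[k].1 < w.2 ∧ token_offsets[k].2 > w.1))
    (adj : List Int) (j : Nat) :
    (wi.foldl (pvA_wordStep token_offsets labels) adj)[j]? =
      if pvTokAny wi
            (fun tok w => (tok.1 < w.2 && tok.2 > w.1) && pvB_isHot token_offsets labels w)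
            token_offsets[j]? = true ∧ j < adj.length
      then some 1 else adj[j]? := by
  induction wi generalizing adj with
  | nil =>
    cases hto : token_offsets[j]? <;> simp [pvTokAny, hto]
  | cons w wi ih =>
    rw [List.foldl_cons]
    have hstep : pvA_wordStep token_offsets labels adj w =
        if pvB_isHot token_offsets labels w then
          (pvA_wordIdxs token_offsets w).foldl (fun a i => PySem.List.pySetD a i 1) adj
        else adj := by
      rw [pvA_wordStep,
        pv_anyA_eq_isHot token_offsets labels w (hws w List.mem_cons_self)]
    rw [hstep]
    have hws' := fun w' hw' => hws w' (List.mem_cons_of_mem w hw')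
    by_cases hhot : pvB_isHot token_offsets labels w
    · rw [if_pos hhot, ih hws']
      rw [pv_foldl_pySetD_length,
        pv_foldl_pySetD_getElem? 1 (pvA_wordIdxs token_offsets w) adj
          (pv_nonneg_wordIdxs token_offsets w) j]
      have hmem : ((j : Int) ∈ pvA_wordIdxs token_offsets w) ↔
          ∃ h : j < token_offsets.length,
            (token_offsets[j].1 < w.2 && token_offsets[j].2 > w.1) = true := by
        rw [pvA_wordIdxs]
        exact pv_mem_filterMap_enumerate token_offsets (fun t => t.1 < w.2 && t.2 > w.1) j
      cases hto : token_offsets[j]? with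
      | none =>
        have hjT : ¬ j < token_offsets.length := by
          rw [List.getElem?_eq_none_iff] at hto; omega
        have : ¬ ((j : Int) ∈ pvA_wordIdxs token_offsets w) := by
          rw [hmem]; rintro ⟨h, -⟩; exact hjT h
        simp [pvTokAny, hto, this]
      | some tok =>
        obtain ⟨hjT, htok⟩ := List.getElem?_eq_some_iff.mp hto
        have hmem' : ((j : Int) ∈ pvA_wordIdxs token_offsets w) ↔
            (tok.1 < w.2 && tok.2 > w.1) = true := by
          rw [hmem]
          constructor
          · rintro ⟨h, hc⟩; rwa [htok] at hc
          · intro hc; exact ⟨hjT, by rwa [htok]⟩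
        simp only [pvTokAny, hto, List.any_cons, hhot, Bool.and_true]
        by_cases hov : (tok.1 < w.2 && tok.2 > w.1) = true
        · simp only [hov, Bool.true_or, true_and]
          by_cases hrest : (wi.any fun x => (tok.1 < x.2 && tok.2 > x.1) &&
              pvB_isHot token_offsets labels x) = true
          · simp only [hrest, hmem', hov, true_and, if_pos]
            by_cases hlen : j < adj.length
            · simp [hlen]
            · have : adj[j]? = none := by rw [List.getElem?_eq_none_iff]; omega
              simp [hlen, this]
          · simp [hrest, hmem', hov]
        · simp only [hov, Bool.false_or]
          have : ¬ ((j : Int) ∈ pvA_wordIdxs token_offsets w) := fun h => hov (hmem'.mp h)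
          simp [this]
    · rw [if_neg hhot, ih hws']
      cases hto : token_offsets[j]? with
      | none => simp [pvTokAny, hto]
      | some tok =>
        have hf : pvB_isHot token_offsets labels w = false := by simpa using hhot
        simp only [pvTokAny, List.any_cons, hf, Bool.and_false, Bool.false_or]
        rfl

-- elementwise characterisation of A's symbol pass
theorem pv_symfold_char (token_offsets : List (Int × Int))
    (si : List (Int × Int)) (adj : List Int) (j : Nat) :
    (si.foldl (pvA_symStep token_offsets) adj)[j]? =
      if pvTokAny si (fun tok s => tok.1 == s.1 && tok.2 == s.2) token_offsets[j]? = true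
          ∧ j < adj.length
      then some 0 else adj[j]? := by
  induction si generalizing adj with
  | nil => cases hto : token_offsets[j]? <;> simp [pvTokAny, hto]
  | cons s si ih =>
    rw [List.foldl_cons, pvA_symStep, ih]
    rw [pv_foldl_pySetD_length,
      pv_foldl_pySetD_getElem? 0 (pvA_symIdxs token_offsets s) adj
        (pv_nonneg_symIdxs token_offsets s) j]
    have hmem : ((j : Int) ∈ pvA_symIdxs token_offsets s) ↔
        ∃ h : j < token_offsets.length,
          (token_offsets[j].1 == s.1 && token_offsets[j].2 == s.2) = true := by
      rw [pvA_symIdxs]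
      exact pv_mem_filterMap_enumerate token_offsets (fun t => t.1 == s.1 && t.2 == s.2) j
    cases hto : token_offsets[j]? with
    | none =>
      have hjT : ¬ j < token_offsets.length := by
        rw [List.getElem?_eq_none_iff] at hto; omega
      have : ¬ ((j : Int) ∈ pvA_symIdxs token_offsets s) := by
        rw [hmem]; rintro ⟨h, -⟩; exact hjT h
      simp [pvTokAny, hto, this]
    | some tok =>
      have h' := List.getElem?_eq_some_iff.mp hto
      obtain ⟨hjT, htok⟩ := h'
      have hmem' : ((j : Int) ∈ pvA_symIdxs token_offsets s) ↔
          (tok.1 == s.1 && tok.2 == s.2) = true := by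
        rw [hmem]
        constructor
        · rintro ⟨h, hc⟩; rwa [htok] at hc
        · intro hc; exact ⟨hjT, by rwa [htok]⟩
      simp only [pvTokAny, hto, List.any_cons]
      by_cases hq : (tok.1 == s.1 && tok.2 == s.2) = true
      · by_cases hrest : (si.any fun x => tok.1 == x.1 && tok.2 == x.2) = true
        · simp only [hq, hrest, hmem', true_and, Bool.true_or, if_pos]
          by_cases hlen : j < adj.length
          · simp [hlen]
          · have : adj[j]? = none := by rw [List.getElem?_eq_none_iff]; omega
            simp [hlen, this]
        · simp [hq, hrest, hmem']
      · have : ¬ ((j : Int) ∈ pvA_symIdxs token_offsets s) := fun h => hq (hmem'.mp h)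
        simp [hq, this]

-- elementwise characterisation of B's token loop (start index generalised for the induction)
theorem pv_Bfold_char (hot : List (Int × Int)) (symset : PySem.Set (Int × Int))
    (l : List (Int × Int)) (s : Nat) (out : List Int) (j : Nat) :
    ((PySem.List.enumerate l (s : Int)).foldl (pvB_step hot symset) out)[j]? =
      match (if s ≤ j then l[j - s]? else none) with
      | some tok =>
          if PySem.Set.contains symset tok then (if j < out.length then some 0 else none)
          else if hot.any (fun w => tok.1 < w.2 && tok.2 > w.1) then
            (if j < out.length then some 1 else none)
          else out[j]?
      | none => out[j]?
      := by
  induction l generalizing s out with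
  | nil =>
    rw [PySem.List.enumerate_nil]
    simp
  | cons x l ih =>
    rw [PySem.List.enumerate_cons, List.foldl_cons]
    have hcast : (s : Int) + 1 = ((s + 1 : Nat) : Int) := by push_cast; ring
    rw [hcast, ih (s + 1) (pvB_step hot symset out ((s : Int), x))]
    have hlen : (pvB_step hot symset out ((s : Int), x)).length = out.length := by
      rw [pvB_step]; split_ifs <;> simp [PySem.List.length_pySetD]
    have houtj : ∀ (hne : j ≠ s),
        (pvB_step hot symset out ((s : Int), x))[j]? = out[j]? := by
      intro hne
      rw [pvB_step]
      have h0 : (0 : Int) ≤ (s : Int) := by omega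
      have hsn : (s : Int).toNat = s := by omega
      have hns : ¬ (s = j) := fun h => hne h.symm
      split_ifs <;>
        simp [PySem.List.pySetD_of_nonneg _ _ h0, hsn, List.getElem?_set, hns]
    rcases Nat.lt_trichotomy j s with hlt | heq | hgt
    · have h1 : ¬ s + 1 ≤ j := by omega
      have h2 : ¬ s ≤ j := by omega
      rw [if_neg h1, if_neg h2]
      exact houtj (by omega)
    · subst heq
      have h1 : ¬ j + 1 ≤ j := by omega
      rw [if_neg h1, if_pos (le_refl j), Nat.sub_self, List.getElem?_cons_zero]
      have h0 : (0 : Int) ≤ (j : Int) := by omega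
      have hsn : ((j : Int)).toNat = j := by omega
      by_cases hc0 : PySem.Set.contains symset x
      · have hm : x ∈ symset := (PySem.Set.contains_iff symset x).mp hc0
        rw [pvB_step]
        simp [hc0, hm, PySem.List.pySetD_of_nonneg _ _ h0, hsn, List.getElem?_set]
      · have hm : ¬ x ∈ symset := fun h => hc0 ((PySem.Set.contains_iff symset x).mpr h)
        by_cases hc1 : (hot.any fun w => x.1 < w.2 && x.2 > w.1)
        · rw [pvB_step]
          simp [hc0, hm, hc1, PySem.List.pySetD_of_nonneg _ _ h0, hsn, List.getElem?_set]
        · rw [pvB_step]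
          simp [hc0, hm, hc1]
    · have h1 : s + 1 ≤ j := by omega
      have h2 : s ≤ j := by omega
      have hidx : (x :: l)[j - s]? = l[j - (s + 1)]? := by
        have hji : j - s = (j - (s + 1)) + 1 := by omega
        rw [hji, List.getElem?_cons_succ]
      rw [if_pos h1, if_pos h2, hidx, hlen]
      cases hto : l[j - (s + 1)]? with
      | none => exact houtj (by omega)
      | some tok => simp [houtj (by omega)]

theorem pv_wordfold_length (token_offsets : List (Int × Int)) (labels : List Int)
    (wi : List (Int × Int)) (adj : List Int) :
    (wi.foldl (pvA_wordStep token_offsets labels) adj).length = adj.length := by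
  induction wi generalizing adj with
  | nil => rfl
  | cons w wi ih =>
    rw [List.foldl_cons, ih, pvA_wordStep]
    split_ifs <;> simp [pv_foldl_pySetD_length]

theorem pv_contains_ofList (si : List (Int × Int)) (tok : Int × Int) :
    PySem.Set.contains (PySem.Set.ofList si) tok =
      si.any (fun s => tok.1 == s.1 && tok.2 == s.2) := by
  rw [Bool.eq_iff_iff, PySem.Set.contains_iff, PySem.Set.mem_ofList, List.any_eq_true]
  constructor
  · intro h; exact ⟨tok, h, by simp⟩
  · rintro ⟨s, hs, he⟩
    simp only [Bool.and_eq_true, beq_iff_eq] at he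
    have : tok = s := Prod.ext he.1 he.2
    rwa [this]

-- ===== VERDICT (by name: the statement is the Claim_ definition above) =====
theorem adjust_labels_spec : Claim_equal_adjust_labels := by
  intro wi si toks labels _ hpre
  unfold Spec_adjust_labels
  unfold Pre_adjust_labels at hpre
  apply List.ext_getElem?
  intro j
  simp only [adjust_labels, adjust_labels_alt]
  rw [pv_symfold_char,
    pv_wordfold_char toks labels wi (fun w hw k hk hLk => (hpre k hk hLk).1 w hw),
    pv_wordfold_length]
  rw [show PySem.List.enumerate toks = PySem.List.enumerate toks (((0:Nat)):Int) from rfl,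
    pv_Bfold_char (wi.filter (pvB_isHot toks labels)) (PySem.Set.ofList si) toks 0 labels j]
  simp only [Nat.zero_le, if_pos, Nat.sub_zero]
  cases hto : toks[j]? with
  | none => simp [pvTokAny, hto]
  | some tok =>
    have h' := List.getElem?_eq_some_iff.mp hto
    obtain ⟨hjT, htok⟩ := h'
    have hcon : PySem.Set.contains (PySem.Set.ofList si) tok =
        pvTokAny si (fun tok s => tok.1 == s.1 && tok.2 == s.2) (some tok) := by
      rw [pv_contains_ofList]; rfl
    have hhotany : (wi.filter (pvB_isHot toks labels)).any
          (fun w => tok.1 < w.2 && tok.2 > w.1) =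
        pvTokAny wi
          (fun t w => (t.1 < w.2 && t.2 > w.1) && pvB_isHot toks labels w) (some tok) := by
      rw [List.any_filter]
      simp only [pvTokAny]
      exact List.any_congr rfl (fun w => Bool.and_comm _ _)
    simp only []
    rw [hcon, hhotany]
    by_cases hc0 : pvTokAny si (fun tok s => tok.1 == s.1 && tok.2 == s.2) (some tok) = true
    · have hjL : j < labels.length := by
        by_contra hge
        have hmem : tok ∈ si := by
          simp only [pvTokAny, List.any_eq_true] at hc0
          obtain ⟨x, hx, he⟩ := hc0
          simp only [Bool.and_eq_true, beq_iff_eq] at he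
          exact (Prod.ext he.1 he.2) ▸ hx
        exact (hpre j hjT (by omega)).2 (htok ▸ hmem)
      simp [hc0, hjL]
    · by_cases hc1 : pvTokAny wi
          (fun t w => (t.1 < w.2 && t.2 > w.1) && pvB_isHot toks labels w) (some tok) = true
      · have hjL : j < labels.length := by
          by_contra hge
          simp only [pvTokAny, List.any_eq_true] at hc1
          obtain ⟨w, hw, he⟩ := hc1
          simp only [Bool.and_eq_true, decide_eq_true_eq] at he
          exact (hpre j hjT (by omega)).1 w hw ⟨htok ▸ he.1.1, htok ▸ he.1.2⟩
        simp only [gt_iff_lt] at hc1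
        simp [hc0, hc1, hjL]
      · simp only [gt_iff_lt] at hc1
        simp [hc0, hc1]
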